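-- pv_equiv track=rewrite | github.com/pymarkus/MarkusVAE | src/markusvae/utils.py | deconv_sizes
-- ===== SOURCE A (Python) =====
-- def deconv_sizes(N, H, W, kernel=(3, 3), stride=(1, 1), padding=(0, 0), output_padding=(0, 0), dilation=(1, 1)):
--     hout, wout = H, W
--     sizes = [(hout, wout)]
--
--     for _ in range(1, N + 1):
--         hout = (hout - 1) * stride[0] - 2 * padding[0] + dilation[0] * (kernel[0] - 1) + output_padding[0] + 1
--         wout = (wout - 1) * stride[1] - 2 * padding[1] + dilation[1] * (kernel[1] - 1) + output_padding[1] + 1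
--         sizes.append((hout, wout))
--     return sizes
-- ===== SOURCE B (Python) =====
-- def deconv_sizes(N, H, W, kernel=(3, 3), stride=(1, 1), padding=(0, 0), output_padding=(0, 0), dilation=(1, 1)):
--     # Closed form: each dimension follows x_{n+1} = a*x_n + b, solved exactly as
--     # x_n = a**n * x0 + b*(a**n - 1)//(a - 1) (geometric series), with a running
--     # power of a; pure integer arithmetic.
--     def dim_series(a, b, x0, count):
--         out = []
--         p = 1  # a**n
--         for n in range(count):
--             if a == 1:
--                 out.append(x0 + n * b)
--             else:
--                 out.append(p * x0 + (b * (p - 1)) // (a - 1))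
--             p *= a
--         return out
--
--     bh = -stride[0] - 2 * padding[0] + dilation[0] * (kernel[0] - 1) + output_padding[0] + 1
--     bw = -stride[1] - 2 * padding[1] + dilation[1] * (kernel[1] - 1) + output_padding[1] + 1
--     count = max(N, 0) + 1
--     return list(zip(dim_series(stride[0], bh, H, count), dim_series(stride[1], bw, W, count)))
-- ===== Notes on version B (the rewrite author's own statement) =====
-- stated objective: alternative
-- what changed: Replaces the iterative layer-by-layer size recurrence with the exact closed-form (geometric-series) solution of the affine recurrence x_{n+1}=a*x_n+b, computed per dimension with a running power and zipped into pairs.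
import Mathlib
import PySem

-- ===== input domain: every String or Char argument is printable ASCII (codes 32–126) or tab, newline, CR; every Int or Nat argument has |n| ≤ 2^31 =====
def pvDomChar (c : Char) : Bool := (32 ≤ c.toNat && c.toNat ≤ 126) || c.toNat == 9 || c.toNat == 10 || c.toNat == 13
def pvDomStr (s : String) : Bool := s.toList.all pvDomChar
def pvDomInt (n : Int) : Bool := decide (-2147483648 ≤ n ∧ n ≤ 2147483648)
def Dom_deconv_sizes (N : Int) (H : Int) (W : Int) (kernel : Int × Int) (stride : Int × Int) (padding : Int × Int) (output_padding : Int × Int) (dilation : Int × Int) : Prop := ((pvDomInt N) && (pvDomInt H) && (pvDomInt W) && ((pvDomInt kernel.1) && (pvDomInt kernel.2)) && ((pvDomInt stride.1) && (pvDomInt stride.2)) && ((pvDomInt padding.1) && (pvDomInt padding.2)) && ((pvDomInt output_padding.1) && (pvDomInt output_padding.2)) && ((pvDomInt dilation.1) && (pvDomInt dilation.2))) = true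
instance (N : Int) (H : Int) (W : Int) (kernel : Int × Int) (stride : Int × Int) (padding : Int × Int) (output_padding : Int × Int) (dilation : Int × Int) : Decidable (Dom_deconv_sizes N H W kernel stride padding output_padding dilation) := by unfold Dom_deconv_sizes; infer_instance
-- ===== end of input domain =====

-- B replaces the layer-by-layer running-size recurrence with the exact closed-form
-- (geometric-series) solution of the affine recurrence, evaluated per index with a
-- running power; objective: alternative algorithm, same asymptotic cost.
-- ===== PORT A =====
-- literal port of A: running (hout, wout) updated per layer, list built by appending
def deconv_sizes (N : Int) (H : Int) (W : Int) (kernel : Int × Int) (stride : Int × Int) (padding : Int × Int) (output_padding : Int × Int) (dilation : Int × Int) : List (Int × Int) :=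
  ((PySem.List.pyRange 1 (N + 1) 1).foldl
    (fun (st : (Int × Int) × List (Int × Int)) _ =>
      let hout := (st.1.1 - 1) * stride.1 - 2 * padding.1 + dilation.1 * (kernel.1 - 1) + output_padding.1 + 1
      let wout := (st.1.2 - 1) * stride.2 - 2 * padding.2 + dilation.2 * (kernel.2 - 1) + output_padding.2 + 1
      ((hout, wout), st.2 ++ [(hout, wout)]))
    ((H, W), [(H, W)])).2

-- ===== PORT B =====
-- closed form per index with a running power p = a^n (geometric-series solution)
def deconvDimSeries (a : Int) (b : Int) (x0 : Int) (count : Int) : List Int :=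
  ((PySem.List.pyRange 0 count 1).foldl
    (fun (st : List Int × Int) n =>
      (st.1 ++ [if a = 1 then x0 + n * b
                else st.2 * x0 + PySem.Int.floordiv (b * (st.2 - 1)) (a - 1)],
       st.2 * a))
    ([], 1)).1

def deconv_sizes_alt (N : Int) (H : Int) (W : Int) (kernel : Int × Int) (stride : Int × Int) (padding : Int × Int) (output_padding : Int × Int) (dilation : Int × Int) : List (Int × Int) :=
  let bh := -stride.1 - 2 * padding.1 + dilation.1 * (kernel.1 - 1) + output_padding.1 + 1
  let bw := -stride.2 - 2 * padding.2 + dilation.2 * (kernel.2 - 1) + output_padding.2 + 1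
  let count := max N 0 + 1
  (deconvDimSeries stride.1 bh H count).zip (deconvDimSeries stride.2 bw W count)

-- ===== PRECONDITION & SPEC =====
def Spec_deconv_sizes (N : Int) (H : Int) (W : Int) (kernel : Int × Int) (stride : Int × Int) (padding : Int × Int) (output_padding : Int × Int) (dilation : Int × Int) (out : List (Int × Int)) : Prop := out = deconv_sizes_alt N H W kernel stride padding output_padding dilation
instance (N : Int) (H : Int) (W : Int) (kernel : Int × Int) (stride : Int × Int) (padding : Int × Int) (output_padding : Int × Int) (dilation : Int × Int) (out : List (Int × Int)) : Decidable (Spec_deconv_sizes N H W kernel stride padding output_padding dilation out) := by unfold Spec_deconv_sizes; infer_instance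

-- ===== CLAIM (what is proved, stated in full; the proofs are below) =====
def Claim_equal_deconv_sizes : Prop := ∀ (N : Int) (H : Int) (W : Int) (kernel : Int × Int) (stride : Int × Int) (padding : Int × Int) (output_padding : Int × Int) (dilation : Int × Int), Dom_deconv_sizes N H W kernel stride padding output_padding dilation → Spec_deconv_sizes N H W kernel stride padding output_padding dilation (deconv_sizes N H W kernel stride padding output_padding dilation)

-- ===== LEMMAS AND PROOFS =====

-- exact division: floordiv (d * x) d = x for d ≠ 0
theorem pv_fd_exact (d x : Int) (hd : d ≠ 0) : PySem.Int.floordiv (d * x) d = x := by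
  have h1 := PySem.Int.floordiv_mul_add_mod (d * x) d
  have h2 : PySem.Int.mod (d * x) d = 0 := by
    rw [PySem.Int.mod_eq_zero_iff_dvd]
    exact Dvd.intro x rfl
  rw [h2, add_zero] at h1
  have : PySem.Int.floordiv (d * x) d * d = x * d := by rw [h1]; ring
  exact mul_right_cancel₀ hd this

-- proof-side closed form for one dimension: x_n for the recurrence x_{n+1} = a*x_n + b
def deconvDim (a : Int) (b : Int) (x0 : Int) (n : Int) : Int :=
  if a = 1 then x0 + n * b
  else a ^ n.toNat * x0 + PySem.Int.floordiv (b * (a ^ n.toNat - 1)) (a - 1)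

-- the closed form solves the affine recurrence step
theorem pv_dim_succ (a b x0 : Int) (n : Nat) :
    deconvDim a b x0 ((n : Int) + 1) = a * deconvDim a b x0 (n : Int) + b := by
  unfold deconvDim
  by_cases ha : a = 1
  · simp [ha]; ring
  · have hd : a - 1 ≠ 0 := sub_ne_zero.mpr ha
    obtain ⟨c, hc⟩ : (a - 1) ∣ (a ^ n - 1) := by
      simpa using sub_dvd_pow_sub_pow a 1 n
    have ht : ((n : Int) + 1).toNat = n + 1 := by omega
    have ht2 : ((n : Int)).toNat = n := by omega
    have hc2 : a ^ (n + 1) - 1 = (a - 1) * (a * c + 1) := by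
      have : a ^ (n + 1) - 1 = a * (a ^ n - 1) + (a - 1) := by ring
      rw [this, hc]; ring
    simp only [ha, ht, ht2, if_false]
    rw [hc, hc2]
    rw [show b * ((a - 1) * (a * c + 1)) = (a - 1) * (b * (a * c + 1)) by ring]
    rw [show b * ((a - 1) * c) = (a - 1) * (b * c) by ring]
    rw [pv_fd_exact _ _ hd, pv_fd_exact _ _ hd]
    ring

-- the closed form equals the n-th iterate of x ↦ a*x + b
theorem pv_dim_iter (a b x0 : Int) (n : Nat) :
    deconvDim a b x0 (n : Int) = (fun x => a * x + b)^[n] x0 := by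
  induction n with
  | zero =>
      unfold deconvDim
      by_cases ha : a = 1
      · simp [ha]
      · have hd : a - 1 ≠ 0 := sub_ne_zero.mpr ha
        have h0 : PySem.Int.floordiv 0 (a - 1) = 0 := by
          simpa using pv_fd_exact (a - 1) 0 hd
        simp [ha, h0]
  | succ k ih =>
      have := pv_dim_succ a b x0 k
      rw [show ((k : Int) + 1) = ((k + 1 : Nat) : Int) by push_cast; ring] at this
      rw [this, ih, Function.iterate_succ_apply']

-- iterate of a componentwise map is the pair of iterates
theorem pv_iter_pair (f g : Int → Int) (n : Nat) (x y : Int) :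
    (fun p : Int × Int => (f p.1, g p.2))^[n] (x, y) = (f^[n] x, g^[n] y) := by
  induction n generalizing x y with
  | zero => rfl
  | succ k ih => simp [Function.iterate_succ_apply, ih]

-- the appending foldl builds the list of iterates
theorem pv_foldl_iter {β : Type} (f : Int × Int → Int × Int) (l : List β)
    (x : Int × Int) (acc : List (Int × Int)) :
    (l.foldl (fun st _ => (f st.1, st.2 ++ [f st.1])) (x, acc)) =
      (f^[l.length] x, acc ++ (List.range l.length).map (fun i => f^[i + 1] x)) := by
  induction l generalizing x acc with
  | nil => simp
  | cons hd tl ih =>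
      simp only [List.foldl_cons, List.length_cons, ih]
      refine Prod.ext ?_ ?_
      · simp [Function.iterate_succ_apply]
      · rw [List.range_succ_eq_map, List.map_cons, List.map_map, List.append_assoc,
            List.singleton_append]
        congr 1

-- cons of the iterates list shifts the range
theorem pv_cons_iter (F : Int × Int → Int × Int) (x : Int × Int) (n : Nat) :
    x :: (List.range n).map (fun i => F^[i + 1] x)
      = (List.range (n + 1)).map (fun k => F^[k] x) := by
  rw [List.range_succ_eq_map, List.map_cons, List.map_map]
  congr 1

-- the series foldl's state after m steps: list of iterates so far, running power a^m
theorem pv_series_state (a b x0 : Int) (m : Nat) :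
    (PySem.List.pyRange 0 (m : Int) 1).foldl
      (fun (st : List Int × Int) n =>
        (st.1 ++ [if a = 1 then x0 + n * b
                  else st.2 * x0 + PySem.Int.floordiv (b * (st.2 - 1)) (a - 1)],
         st.2 * a))
      ([], 1)
    = ((List.range m).map (fun k => (fun x => a * x + b)^[k] x0), a ^ m) := by
  induction m with
  | zero => rw [Nat.cast_zero, PySem.List.pyRange_one_eq_nil le_rfl]; simp
  | succ k ih =>
      rw [show ((k + 1 : Nat) : Int) = (k : Int) + 1 by push_cast; ring,
          PySem.List.pyRange_one_succ_right (by positivity), List.foldl_append, ih]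
      simp only [List.foldl_cons, List.foldl_nil]
      refine Prod.ext ?_ ?_
      · show List.map _ _ ++ [_] = _
        rw [List.range_succ, List.map_append, List.map_singleton]
        congr 1
        have : (if a = 1 then x0 + (k : Int) * b
                else a ^ k * x0 + PySem.Int.floordiv (b * (a ^ k - 1)) (a - 1))
            = deconvDim a b x0 (k : Int) := by
          unfold deconvDim
          rw [show ((k : Int)).toNat = k by omega]
        rw [this, pv_dim_iter]
      · show a ^ k * a = a ^ (k + 1)
        rw [pow_succ]

theorem pvSeriesClosed (a b x0 : Int) (m : Nat) :
    deconvDimSeries a b x0 (m : Int) = (List.range m).map (fun k => (fun x => a * x + b)^[k] x0) := by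
  unfold deconvDimSeries
  rw [pv_series_state]

-- ===== VERDICT (by name: the statement is the Claim_ definition above) =====
-- ===== LEMMAS AND PROOFS =====
theorem deconv_sizes_spec : Claim_equal_deconv_sizes := by
  intro N H W kernel stride padding output_padding dilation _
  unfold Spec_deconv_sizes deconv_sizes
  simp only [deconv_sizes_alt]
  set F := fun p : Int × Int =>
    (stride.1 * p.1 + (-stride.1 - 2 * padding.1 + dilation.1 * (kernel.1 - 1) + output_padding.1 + 1),
     stride.2 * p.2 + (-stride.2 - 2 * padding.2 + dilation.2 * (kernel.2 - 1) + output_padding.2 + 1)) with hF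
  have hbody : (fun (st : (Int × Int) × List (Int × Int)) (_ : Int) =>
      let hout := (st.1.1 - 1) * stride.1 - 2 * padding.1 + dilation.1 * (kernel.1 - 1) + output_padding.1 + 1
      let wout := (st.1.2 - 1) * stride.2 - 2 * padding.2 + dilation.2 * (kernel.2 - 1) + output_padding.2 + 1
      ((hout, wout), st.2 ++ [(hout, wout)]))
    = (fun st _ => (F st.1, st.2 ++ [F st.1])) := by
    funext st i
    have h1 : (st.1.1 - 1) * stride.1 - 2 * padding.1 + dilation.1 * (kernel.1 - 1) + output_padding.1 + 1
        = stride.1 * st.1.1 + (-stride.1 - 2 * padding.1 + dilation.1 * (kernel.1 - 1) + output_padding.1 + 1) := by ring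
    have h2 : (st.1.2 - 1) * stride.2 - 2 * padding.2 + dilation.2 * (kernel.2 - 1) + output_padding.2 + 1
        = stride.2 * st.1.2 + (-stride.2 - 2 * padding.2 + dilation.2 * (kernel.2 - 1) + output_padding.2 + 1) := by ring
    simp only [hF, h1, h2]
  rw [hbody, pv_foldl_iter]
  rw [PySem.List.length_pyRange_one]
  have hNn : (N + 1 - 1).toNat = N.toNat := by omega
  rw [hNn]
  rw [show max N 0 + 1 = ((N.toNat + 1 : Nat) : Int) by omega]
  rw [pvSeriesClosed, pvSeriesClosed, List.zip_map']
  calc ([(H, W)] ++ (List.range N.toNat).map (fun i => F^[i + 1] (H, W)))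
      = (List.range (N.toNat + 1)).map (fun k => F^[k] (H, W)) := by
        rw [List.singleton_append, pv_cons_iter]
    _ = _ := by
        refine List.map_congr_left fun k _ => ?_
        rw [hF]
        exact pv_iter_pair
          (fun x => stride.1 * x + (-stride.1 - 2 * padding.1 + dilation.1 * (kernel.1 - 1) + output_padding.1 + 1))
          (fun x => stride.2 * x + (-stride.2 - 2 * padding.2 + dilation.2 * (kernel.2 - 1) + output_padding.2 + 1))
          k H W
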